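-- pv_equiv track=rewrite | github.com/jerome-pouiller/callgraph-walker | callgraph-walker.py | map_path_to_cmake_var
-- ===== SOURCE A (Python) =====
-- def map_path_to_cmake_var(file_path, cmake_vars):
--     """
--     Try to map a file path to a CMake variable.
--     Returns the path with CMake variable substitution if a match is found.
--     """
--     # Sort by length (longest first) to match most specific paths first
--     sorted_vars = sorted(cmake_vars.items(), key=lambda x: len(x[1]), reverse=True)
--
--     for var_name, var_value in sorted_vars:
--         if var_value and file_path.startswith(var_value):
--             # Replace the variable value with ${VAR_NAME}
--             remaining_path = file_path[len(var_value):].lstrip('/')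
--             if remaining_path:
--                 return f"${{{var_name}}}/{remaining_path}"
--             else:
--                 return f"${{{var_name}}}"
--
--     return file_path
-- ===== SOURCE B (Python) =====
-- def map_path_to_cmake_var(file_path, cmake_vars):
--     """
--     Try to map a file path to a CMake variable.
--     Single linear pass: track the longest-valued variable whose value prefixes
--     the path (first one wins among equal lengths), then substitute it.
--     """
--     best = None  # (var_name, var_value) with the longest matching value so far
--     for name, value in cmake_vars.items():
--         if value and file_path.startswith(value) and (best is None or len(value) > len(best[1])):
--             best = (name, value)
--
--     if best is None:
--         return file_path
--     name, value = best
--     remaining = file_path[len(value):].lstrip('/')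
--     if remaining:
--         return f"${{{name}}}/{remaining}"
--     return f"${{{name}}}"
-- ===== Notes on version B (the rewrite author's own statement) =====
-- stated objective: simpler
-- what changed: Replaces sort-by-value-length-descending followed by first-prefix-match with a single linear pass over the dict that tracks the strictly-longest matching variable (first one wins among equal lengths), then renders the substitution once.
import Mathlib
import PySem

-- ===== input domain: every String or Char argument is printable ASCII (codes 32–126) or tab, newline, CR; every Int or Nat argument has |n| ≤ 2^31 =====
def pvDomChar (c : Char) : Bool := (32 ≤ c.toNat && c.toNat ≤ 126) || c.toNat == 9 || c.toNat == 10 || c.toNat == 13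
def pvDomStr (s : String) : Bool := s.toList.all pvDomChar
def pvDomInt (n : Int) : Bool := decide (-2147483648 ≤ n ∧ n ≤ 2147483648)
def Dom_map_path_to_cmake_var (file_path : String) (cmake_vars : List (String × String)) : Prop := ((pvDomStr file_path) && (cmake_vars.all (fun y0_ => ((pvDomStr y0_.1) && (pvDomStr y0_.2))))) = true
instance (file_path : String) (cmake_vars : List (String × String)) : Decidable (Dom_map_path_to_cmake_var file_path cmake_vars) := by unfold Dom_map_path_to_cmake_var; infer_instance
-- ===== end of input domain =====

-- B replaces A's sort-then-first-match with one linear pass keeping the strictly-longest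
-- matching variable; objective: simpler (no sort).

-- hand port of s.lstrip('/') (PySem has only whitespace lstrip): drop leading '/' code
-- points — exact, since lstrip('/') removes exactly the leading '/' characters
def pvLstripSlash (s : String) : String := String.ofList (s.toList.dropWhile (fun c => c == '/'))

-- ===== PORT A =====
-- the for-loop with early return over the sorted items
def pvMapLoopA (file_path : String) : List (String × String) → String
  | [] => file_path
  | (var_name, var_value) :: rest =>
    if (var_value != "") && PySem.Str.startswith file_path var_value then
      let remaining_path := pvLstripSlash (PySem.Str.slice file_path (some (PySem.Str.len var_value)) none)
      if remaining_path != "" then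
        PySem.Str.join "" ["${", var_name, "}/", remaining_path]
      else
        PySem.Str.join "" ["${", var_name, "}"]
    else pvMapLoopA file_path rest

def map_path_to_cmake_var (file_path : String) (cmake_vars : List (String × String)) : String :=
  pvMapLoopA file_path
    (PySem.List.sorted (PySem.Dict.ofList cmake_vars).items (fun x => PySem.Str.len x.2) true)

-- ===== PORT B =====
def map_path_to_cmake_var_alt (file_path : String) (cmake_vars : List (String × String)) : String :=
  let best : Option (String × String) :=
    (PySem.Dict.ofList cmake_vars).items.foldl
      (fun best p =>
        if (p.2 != "") && PySem.Str.startswith file_path p.2 &&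
           (match best with
            | none => true
            | some b => decide (PySem.Str.len b.2 < PySem.Str.len p.2)) then
          some p
        else best)
      none
  match best with
  | none => file_path
  | some (name, value) =>
    let remaining := pvLstripSlash (PySem.Str.slice file_path (some (PySem.Str.len value)) none)
    if remaining != "" then
      PySem.Str.join "" ["${", name, "}/", remaining]
    else
      PySem.Str.join "" ["${", name, "}"]

-- ===== PRECONDITION & SPEC =====
def Spec_map_path_to_cmake_var (file_path : String) (cmake_vars : List (String × String)) (out : String) : Prop := out = map_path_to_cmake_var_alt file_path cmake_vars
instance (file_path : String) (cmake_vars : List (String × String)) (out : String) : Decidable (Spec_map_path_to_cmake_var file_path cmake_vars out) := by unfold Spec_map_path_to_cmake_var; infer_instance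

-- ===== CLAIM (what is proved, stated in full; the proofs are below) =====
def Claim_equal_map_path_to_cmake_var : Prop := ∀ (file_path : String) (cmake_vars : List (String × String)), Dom_map_path_to_cmake_var file_path cmake_vars → Spec_map_path_to_cmake_var file_path cmake_vars (map_path_to_cmake_var file_path cmake_vars)

-- ===== LEMMAS AND PROOFS =====

-- the match predicate: non-empty value that prefixes the path
def pvM (fp : String) (p : String × String) : Bool :=
  (p.2 != "") && PySem.Str.startswith fp p.2

-- the rendering both programs perform on the chosen pair
def pvRender (fp : String) (p : String × String) : String :=
  let remaining := pvLstripSlash (PySem.Str.slice fp (some (PySem.Str.len p.2)) none)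
  if remaining != "" then PySem.Str.join "" ["${", p.1, "}/", remaining]
  else PySem.Str.join "" ["${", p.1, "}"]

-- B's fold step
def pvStep (fp : String) (best : Option (String × String)) (p : String × String) :
    Option (String × String) :=
  if pvM fp p &&
     (match best with
      | none => true
      | some b => decide (PySem.Str.len b.2 < PySem.Str.len p.2)) then
    some p
  else best

lemma pvMapLoopA_eq_find (fp : String) (ys : List (String × String)) :
    pvMapLoopA fp ys = match ys.find? (pvM fp) with
      | some p => pvRender fp p
      | none => fp := by
  induction ys with
  | nil => rfl
  | cons p rest ih =>
    obtain ⟨n, v⟩ := p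
    have hcond : pvM fp (n, v) = ((v != "") && PySem.Str.startswith fp v) := rfl
    cases h : pvM fp (n, v) with
    | true =>
      rw [List.find?_cons_of_pos h]
      rw [hcond] at h
      simp only [pvMapLoopA]
      rw [if_pos h]
      rfl
    | false =>
      rw [List.find?_cons_of_neg (by rw [h]; exact Bool.false_ne_true)]
      rw [hcond] at h
      simp only [pvMapLoopA]
      rw [if_neg (by rw [h]; exact Bool.false_ne_true), ih]

lemma pvInsertBy_split {α : Type} (bef : α → α → Bool) (x : α) (ys : List α) :
    PySem.List.insertBy bef x ys =
      ys.takeWhile (fun y => !bef x y) ++ x :: ys.dropWhile (fun y => !bef x y) := by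
  induction ys with
  | nil => rfl
  | cons y t ih =>
    by_cases h : bef x y = true
    · simp [PySem.List.insertBy, h]
    · simp only [Bool.not_eq_true] at h
      simp [PySem.List.insertBy, h, ih]

lemma pvDropWhile_head {α : Type} (p : α → Bool) (l : List α) {x : α} {xs : List α}
    (h : l.dropWhile p = x :: xs) : p x = false := by
  induction l with
  | nil => simp at h
  | cons a t ih =>
    by_cases hp : p a = true
    · rw [List.dropWhile_cons, if_pos hp] at h; exact ih h
    · rw [List.dropWhile_cons, if_neg hp] at h
      cases h
      simpa using hp

-- inserting p into a length-descending list and taking the first match is B's step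
lemma pvInsert_find (fp : String) (p : String × String) (ys : List (String × String))
    (hsorted : List.Pairwise (fun a b => PySem.Str.len b.2 ≤ PySem.Str.len a.2) ys) :
    (PySem.List.insertBy
        (fun a b => decide (PySem.Str.len b.2 < PySem.Str.len a.2)) p ys).find? (pvM fp)
      = pvStep fp (ys.find? (pvM fp)) p := by
  set bef : (String × String) → (String × String) → Bool :=
    fun a b => decide (PySem.Str.len b.2 < PySem.Str.len a.2) with hbef
  set t := ys.takeWhile (fun y => !bef p y) with ht
  set d := ys.dropWhile (fun y => !bef p y) with hd
  have hsplit : PySem.List.insertBy bef p ys = t ++ p :: d := pvInsertBy_split bef p ys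
  have htd : t ++ d = ys := List.takeWhile_append_dropWhile
  rw [hsplit, List.find?_append]
  have hysfind : ys.find? (pvM fp) = (t.find? (pvM fp)).or (d.find? (pvM fp)) := by
    rw [← htd, List.find?_append]
  rw [hysfind]
  cases hft : t.find? (pvM fp) with
  | some m =>
    -- the first match sits in the long-or-equal prefix: A keeps it and so does B's step
    have hm : m ∈ t := List.mem_of_find?_eq_some hft
    have hlen : ¬ PySem.Str.len m.2 < PySem.Str.len p.2 := by
      have := List.mem_takeWhile_imp hm
      simp only [hbef, Bool.not_eq_eq_eq_not, Bool.not_true, decide_eq_false_iff_not] at this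
      exact this
    have hlen' : ¬ m.2.length < p.2.length := by simpa using hlen
    simp [pvStep, hlen']
  | none =>
    simp only [Option.none_or]
    by_cases hp : pvM fp p = true
    · -- p matches: everything after p is strictly shorter, so B's step also picks p
      rw [List.find?_cons_of_pos hp]
      cases hfd : d.find? (pvM fp) with
      | none => simp [pvStep, hp]
      | some q =>
        have hq : q ∈ d := List.mem_of_find?_eq_some hfd
        have hqlt : PySem.Str.len q.2 < PySem.Str.len p.2 := by
          cases hdc : d with
          | nil => rw [hdc] at hq; simp at hq
          | cons h0 d' =>
            have hh0 : PySem.Str.len h0.2 < PySem.Str.len p.2 := by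
              have := pvDropWhile_head (fun y => !bef p y) ys (hd ▸ hdc)
              simpa [hbef] using this
            have hpd : List.Pairwise (fun a b => PySem.Str.len b.2 ≤ PySem.Str.len a.2) d :=
              List.Pairwise.sublist (hd ▸ List.dropWhile_sublist _) hsorted
            rw [hdc] at hpd hq
            rcases List.mem_cons.mp hq with hq0 | hq1
            · exact hq0 ▸ hh0
            · have := (List.pairwise_cons.mp hpd).1 q hq1
              omega
        have hqlt' : q.2.length < p.2.length := by simpa using hqlt
        simp [pvStep, hp, hqlt']
    · rw [List.find?_cons_of_neg hp]
      rw [Bool.not_eq_true] at hp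
      simp [pvStep, hp]

-- first match of the length-descending stable sort = B's left fold
lemma pvSorted_find_eq_foldl (fp : String) (l : List (String × String)) :
    (PySem.List.sorted l (fun x => PySem.Str.len x.2) true).find? (pvM fp)
      = l.foldl (pvStep fp) none := by
  induction l using List.reverseRecOn with
  | nil => rfl
  | append_singleton l' p ih =>
    rw [PySem.List.sorted_rev_eq_foldl_insertBy, List.foldl_append, List.foldl_append]
    simp only [List.foldl_cons, List.foldl_nil]
    rw [← PySem.List.sorted_rev_eq_foldl_insertBy]
    rw [pvInsert_find fp p _ (PySem.List.sorted_pairwise_rev l' (fun x => PySem.Str.len x.2)), ih]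

theorem pv_main (fp : String) (cmake_vars : List (String × String)) :
    map_path_to_cmake_var fp cmake_vars = map_path_to_cmake_var_alt fp cmake_vars := by
  unfold map_path_to_cmake_var map_path_to_cmake_var_alt
  rw [pvMapLoopA_eq_find, pvSorted_find_eq_foldl]
  have hstep : (PySem.Dict.ofList cmake_vars).items.foldl
      (fun best p =>
        if (p.2 != "") && PySem.Str.startswith fp p.2 &&
           (match best with
            | none => true
            | some b => decide (PySem.Str.len b.2 < PySem.Str.len p.2)) then
          some p
        else best) none
      = (PySem.Dict.ofList cmake_vars).items.foldl (pvStep fp) none := rfl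
  rw [← hstep]
  cases hb : (PySem.Dict.ofList cmake_vars).items.foldl
      (fun best p =>
        if (p.2 != "") && PySem.Str.startswith fp p.2 &&
           (match best with
            | none => true
            | some b => decide (PySem.Str.len b.2 < PySem.Str.len p.2)) then
          some p
        else best) none with
  | none => rfl
  | some q => obtain ⟨n, v⟩ := q; rfl

-- ===== VERDICT (by name: the statement is the Claim_ definition above) =====
theorem map_path_to_cmake_var_spec : Claim_equal_map_path_to_cmake_var := by
  intro fp vars _
  unfold Spec_map_path_to_cmake_var
  exact pv_main fp vars
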